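-- pv_equiv track=rewrite | github.com/SMIDDLEgroup/MindMeldTeacherTool | dump_loader.py | is_selected_text_inside_quotes
-- ===== SOURCE A (Python) =====
-- def is_selected_text_inside_quotes(full_text, selected_text):
--     is_quote_opened = False
--     for i in range(len(full_text)):
--         char = full_text[i]
--         if char == '{':
--             is_quote_opened = True
--         elif char == '}':
--             is_quote_opened = False
--         text_left = full_text[i:]
--         if is_quote_opened and selected_text in text_left[:text_left.index('}')]:
--             return True
--     return False
-- ===== SOURCE B (Python) =====
-- def is_selected_text_inside_quotes(full_text, selected_text):
--     pos = 0
--     while True: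
--         b = full_text.find('{', pos)
--         if b == -1:
--             return False
--         j = full_text.find('}', b + 1)
--         if j == -1:
--             return False
--         if selected_text in full_text[b:j]:
--             return True
--         pos = j + 1
-- ===== Notes on version B (the rewrite author's own statement) =====
-- stated objective: faster
-- what changed: B jumps from brace region to brace region with find() and does one substring test per region, instead of A's per-character loop that re-slices the text and re-scans for '}' and for the selected text at every index.
-- outside the precondition, e.g. on is_selected_text_inside_quotes('{a}{', 'a'): A returns True, B returns True
import Mathlib
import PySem

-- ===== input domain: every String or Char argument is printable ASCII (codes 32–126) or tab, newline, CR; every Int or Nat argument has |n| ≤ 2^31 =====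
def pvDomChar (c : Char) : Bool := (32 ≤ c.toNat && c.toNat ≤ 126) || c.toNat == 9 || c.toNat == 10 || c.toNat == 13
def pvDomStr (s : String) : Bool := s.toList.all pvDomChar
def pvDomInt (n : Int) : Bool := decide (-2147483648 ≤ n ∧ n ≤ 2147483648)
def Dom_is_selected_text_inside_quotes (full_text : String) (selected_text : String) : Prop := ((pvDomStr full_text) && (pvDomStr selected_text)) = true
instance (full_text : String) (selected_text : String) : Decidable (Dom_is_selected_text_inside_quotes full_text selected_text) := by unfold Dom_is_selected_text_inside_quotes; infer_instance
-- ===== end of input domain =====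

-- B replaces A's per-index loop (slice + index('}') + substring test at every position) by a
-- find-driven jump from brace region to brace region with a single substring test per region.

-- ===== PORT A =====
-- Python's is_quote_opened update at character c.
def pvNext (opened : Bool) (c : Char) : Bool :=
  if c = '{' then true else if c = '}' then false else opened

-- per-index loop; window c :: rest is Python's text_left = full_text[i:].
def pvLoopA (sel : List Char) : Bool → List Char → Bool
  | _, [] => false
  | opened, c :: rest =>
    let o := pvNext opened c
    if o then
      if (c :: rest).contains '}' then
        -- text_left[:text_left.index('}')] = takeWhile (≠ '}'); Python's 'in' = PySem.Chars.isIn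
        if PySem.Chars.isIn sel ((c :: rest).takeWhile (fun x => x ≠ '}')) then true
        else pvLoopA sel o rest
      else false   -- Python: text_left.index('}') raises ValueError here (excluded by Pre_)
    else pvLoopA sel o rest

def is_selected_text_inside_quotes (full_text : String) (selected_text : String) : Bool :=
  pvLoopA selected_text.toList false full_text.toList

-- ===== PORT B =====
-- scan to the next '{' (find), then to the first '}' after it (find), one substring test
-- on that region, then jump to just past the '}' (pos = j + 1).
def pvLoopB (sel : List Char) : List Char → Bool
  | [] => false                                       -- find('{', pos) == -1
  | c :: rest =>
    if c = '{' then
      if rest.contains '}' then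
        if PySem.Chars.isIn sel ((c :: rest).takeWhile (fun x => x ≠ '}')) then true
        else pvLoopB sel ((rest.dropWhile (fun x => x ≠ '}')).tail)
      else false                                      -- find('}', b+1) == -1
    else pvLoopB sel rest
termination_by l => l.length
decreasing_by
  · have h1 : (rest.dropWhile (fun x => decide (x ≠ '}'))).length ≤ rest.length :=
      List.length_dropWhile_le _ _
    simp only [List.length_tail, List.length_cons]; omega
  · simp

def is_selected_text_inside_quotes_alt (full_text : String) (selected_text : String) : Bool :=
  pvLoopB selected_text.toList full_text.toList

-- ===== PRECONDITION & SPEC =====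
-- Pre_ excludes texts containing a '{' after the last '}' (an unclosed brace region): there
-- A's text_left.index('}') raises ValueError unless an earlier complete region already matched.
def Pre_is_selected_text_inside_quotes (full_text : String) (selected_text : String) : Prop :=
  (full_text.toList.reverse.takeWhile (fun x => x ≠ '}')).contains '{' = false
instance (full_text : String) (selected_text : String) : Decidable (Pre_is_selected_text_inside_quotes full_text selected_text) := by unfold Pre_is_selected_text_inside_quotes; infer_instance
def pvWitness_is_selected_text_inside_quotes : String × String := ("{abc} def", "bc")

def Spec_is_selected_text_inside_quotes (full_text : String) (selected_text : String) (out : Bool) : Prop := out = is_selected_text_inside_quotes_alt full_text selected_text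
instance (full_text : String) (selected_text : String) (out : Bool) : Decidable (Spec_is_selected_text_inside_quotes full_text selected_text out) := by unfold Spec_is_selected_text_inside_quotes; infer_instance

-- ===== CLAIM (what is proved, stated in full; the proofs are below) =====
def Claim_equal_is_selected_text_inside_quotes : Prop := ∀ (full_text : String) (selected_text : String), Dom_is_selected_text_inside_quotes full_text selected_text → Pre_is_selected_text_inside_quotes full_text selected_text → Spec_is_selected_text_inside_quotes full_text selected_text (is_selected_text_inside_quotes full_text selected_text)

-- ===== LEMMAS AND PROOFS =====

-- pvQ l: every suffix of l that starts with '{' has a '}' later in it (no unclosed region).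
def pvQ (l : List Char) : Prop := ∀ s : List Char, ('{' :: s) <:+ l → '}' ∈ s

theorem pvQ_suffix {l s : List Char} (hs : s <:+ l) (h : pvQ l) : pvQ s :=
  fun t ht => h t (ht.trans hs)

theorem pvQ_tail {c : Char} {l : List Char} (h : pvQ (c :: l)) : pvQ l :=
  pvQ_suffix (List.suffix_cons c l) h

theorem pvQ_open {l : List Char} (h : pvQ ('{' :: l)) : '}' ∈ l :=
  h l (List.suffix_refl _)

theorem takeWhile_append_all {α : Type} (p : α → Bool) (l₁ l₂ : List α)
    (h : ∀ x ∈ l₁, p x = true) : (l₁ ++ l₂).takeWhile p = l₁ ++ l₂.takeWhile p := by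
  induction l₁ with
  | nil => simp
  | cons a t ih =>
    have ha := h a (by simp)
    simp [ha, ih (fun x hx => h x (by simp [hx]))]

-- Pre_ implies pvQ of the character list.
theorem pre_imp_Q (l : List Char)
    (h : (l.reverse.takeWhile (fun x => x ≠ '}')).contains '{' = false) : pvQ l := by
  intro s hs
  by_contra hmem
  rcases hs with ⟨a, ha⟩
  apply absurd h
  simp only [← ha, List.reverse_append]
  have hall : ∀ x ∈ s.reverse, (decide (x ≠ '}')) = true := by
    intro x hx
    simp only [List.mem_reverse] at hx
    simp only [decide_eq_true_eq]
    intro hxe; exact hmem (hxe ▸ hx)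
  rw [show ('{' :: s).reverse = s.reverse ++ ['{'] by simp, List.append_assoc,
      takeWhile_append_all _ _ _ hall]
  simp

-- one-step unfolding of pvLoopA with the let reduced.
theorem loopA_cons (sel : List Char) (opened : Bool) (c : Char) (rest : List Char) :
    pvLoopA sel opened (c :: rest) =
      (if pvNext opened c then
        (if (c :: rest).contains '}' then
          (if PySem.Chars.isIn sel ((c :: rest).takeWhile (fun x => x ≠ '}')) then true
           else pvLoopA sel (pvNext opened c) rest)
         else false)
       else pvLoopA sel (pvNext opened c) rest) := rfl

-- substring of a list is a substring of the cons.
theorem isIn_cons {sel t : List Char} (c : Char)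
    (h : PySem.Chars.isIn sel t = true) : PySem.Chars.isIn sel (c :: t) = true := by
  rw [PySem.Chars.isIn_iff_infix] at *
  exact List.infix_cons h

-- Inside an opened region (head ≠ '}', a '}' ahead), A's remaining per-index checks amount to
-- a single check of the full region followed by the closed-state loop after the '}'.
theorem loopA_region (sel : List Char) :
    ∀ (rest : List Char) (c : Char), c ≠ '}' → '}' ∈ rest →
    pvLoopA sel true (c :: rest) =
      (PySem.Chars.isIn sel ((c :: rest).takeWhile (fun x => x ≠ '}')) ||
        pvLoopA sel false ((rest.dropWhile (fun x => x ≠ '}')).tail)) := by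
  intro rest
  induction rest with
  | nil => intro c _ hmem; simp at hmem
  | cons d rest' ih =>
    intro c hc hmem
    by_cases hd : d = '}'
    · subst hd
      have htw : ((c :: '}' :: rest').takeWhile (fun x => x ≠ '}')) = [c] := by
        simp [hc]
      rw [htw]
      cases hsel : PySem.Chars.isIn sel [c] <;>
        simp [pvLoopA, pvNext, hc, hsel]
    · have hmem' : '}' ∈ rest' := by
        rcases List.mem_cons.mp hmem with h | h
        · exact absurd h.symm hd
        · exact h
      have hcontains : ((c :: d :: rest').contains '}') = true := by
        simp
        exact Or.inr (Or.inr hmem')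
      have htw : (c :: d :: rest').takeWhile (fun x => x ≠ '}') =
          c :: d :: rest'.takeWhile (fun x => x ≠ '}') := by
        simp [hc, hd]
      have ho : pvNext true c = true := by
        by_cases h : c = '{' <;> simp [pvNext, h, hc]
      cases hsel : PySem.Chars.isIn sel ((c :: d :: rest').takeWhile (fun x => x ≠ '}')) with
      | true =>
        rw [loopA_cons, ho, hsel]
        simp [hmem']
      | false =>
        have hsel' : PySem.Chars.isIn sel ((d :: rest').takeWhile (fun x => x ≠ '}')) = false := by
          cases h2 : PySem.Chars.isIn sel ((d :: rest').takeWhile (fun x => x ≠ '}')) with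
          | false => rfl
          | true =>
            exfalso
            have htwd : ((d :: rest').takeWhile (fun x => x ≠ '}')) =
                d :: rest'.takeWhile (fun x => x ≠ '}') := by simp [hd]
            rw [htwd] at h2
            have h3 := isIn_cons c h2
            rw [htw, h3] at hsel
            exact Bool.true_eq_false.mp hsel
        have hstep : pvLoopA sel true (c :: d :: rest') = pvLoopA sel true (d :: rest') := by
          rw [loopA_cons, ho, hsel]
          simp [hmem']
        rw [hstep, ih d hd hmem', hsel']
        simp [hd]

-- when the head is '{', the incoming opened flag is irrelevant.
theorem loopA_open_head (sel : List Char) (rest : List Char) :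
    pvLoopA sel false ('{' :: rest) = pvLoopA sel true ('{' :: rest) := by
  simp [pvLoopA, pvNext]

-- one-step unfolding of pvLoopB at an opening brace.
theorem loopB_cons_open (sel : List Char) (rest : List Char) :
    pvLoopB sel ('{' :: rest) =
      (if rest.contains '}' then
        (if PySem.Chars.isIn sel ((('{' : Char) :: rest).takeWhile (fun x => x ≠ '}')) then true
         else pvLoopB sel ((rest.dropWhile (fun x => x ≠ '}')).tail))
       else false) := by
  rw [pvLoopB]
  simp

-- main invariant: in the closed state, A's loop equals B's region scan on unclosed-free text.
theorem loopAB (sel : List Char) :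
    ∀ (n : Nat) (l : List Char), l.length ≤ n → pvQ l →
      pvLoopA sel false l = pvLoopB sel l := by
  intro n
  induction n with
  | zero =>
    intro l hl _
    have : l = [] := List.eq_nil_of_length_eq_zero (Nat.le_zero.mp hl)
    simp [this, pvLoopA, pvLoopB]
  | succ n ih =>
    intro l hl hQ
    match l with
    | [] => simp [pvLoopA, pvLoopB]
    | c :: rest =>
      by_cases hc : c = '{'
      · subst hc
        have hr : '}' ∈ rest := pvQ_open hQ
        have hcontains' : (rest.contains '}') = true := by
          simp; exact hr
        rw [loopA_open_head, loopA_region sel rest '{' (by decide) hr]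
        have htail_suffix : ((rest.dropWhile (fun x => x ≠ '}')).tail) <:+ ('{' :: rest) := by
          have h1 : (rest.dropWhile (fun x => decide (x ≠ '}'))).tail <:+
              rest.dropWhile (fun x => decide (x ≠ '}')) := List.tail_suffix _
          have h2 : rest.dropWhile (fun x => decide (x ≠ '}')) <:+ rest :=
            List.dropWhile_suffix _
          exact ((h1.trans h2).trans (List.suffix_cons '{' rest))
        have hQt : pvQ ((rest.dropWhile (fun x => x ≠ '}')).tail) := pvQ_suffix htail_suffix hQ
        have hlen : ((rest.dropWhile (fun x => x ≠ '}')).tail).length ≤ n := by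
          have h1 : (rest.dropWhile (fun x => decide (x ≠ '}'))).length ≤ rest.length :=
            List.length_dropWhile_le _ _
          simp only [List.length_tail]
          simp only [List.length_cons] at hl
          omega
        rw [ih _ hlen hQt, loopB_cons_open, if_pos hcontains']
        cases hsel : PySem.Chars.isIn sel ((('{' : Char) :: rest).takeWhile (fun x => x ≠ '}')) <;>
          simp
      · have hstepA : pvLoopA sel false (c :: rest) = pvLoopA sel false rest := by
          by_cases hcc : c = '}' <;> simp [pvLoopA, pvNext, hc, hcc]
        have hstepB : pvLoopB sel (c :: rest) = pvLoopB sel rest := by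
          simp [pvLoopB, hc]
        rw [hstepA, hstepB]
        exact ih rest (by simp only [List.length_cons] at hl; omega) (pvQ_tail hQ)

-- ===== VERDICT (by name: the statement is the Claim_ definition above) =====
theorem is_selected_text_inside_quotes_spec : Claim_equal_is_selected_text_inside_quotes := by
  intro full_text selected_text _ hpre
  unfold Spec_is_selected_text_inside_quotes is_selected_text_inside_quotes
    is_selected_text_inside_quotes_alt
  exact loopAB selected_text.toList full_text.toList.length full_text.toList le_rfl
    (pre_imp_Q full_text.toList hpre)
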